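-- pv_equiv track=rewrite | github.com/sorael/checkio | Electronic Station/Weak Point.py | weak_point
-- ===== SOURCE A (Python) =====
-- def weak_point(matrix):
--     rows = []
--     for i in matrix:
--         rows.append(sum(i))
--     row = min((row_sum, index) for (index, row_sum) in enumerate(rows))
--     columns = zip(*matrix[::-1])
--     cols = []
--     for i in columns:
--         cols.append(sum(i))
--     col = min((col_sum, index) for (index, col_sum) in enumerate(cols))
--     return [row[1], col[1]]
-- ===== SOURCE B (Python) =====
-- def weak_point(matrix):
--     m = min(len(r) for r in matrix)
--     row_sums = []
--     col_sums = [0] * m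
--     for r in matrix:
--         row_sums.append(sum(r))
--         col_sums = [col_sums[j] + r[j] for j in range(m)]
--     return [row_sums.index(min(row_sums)), col_sums.index(min(col_sums))]
-- ===== Notes on version B (the rewrite author's own statement) =====
-- stated objective: alternative
-- what changed: B makes a single pass over the rows maintaining both the row-sum list and a column-sum accumulator sized to the shortest row, then picks each index with min()+list.index(), replacing A's build-rows / reverse-and-zip-transpose / second-loop / min-over-(sum,index)-tuples structure.
import Mathlib
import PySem

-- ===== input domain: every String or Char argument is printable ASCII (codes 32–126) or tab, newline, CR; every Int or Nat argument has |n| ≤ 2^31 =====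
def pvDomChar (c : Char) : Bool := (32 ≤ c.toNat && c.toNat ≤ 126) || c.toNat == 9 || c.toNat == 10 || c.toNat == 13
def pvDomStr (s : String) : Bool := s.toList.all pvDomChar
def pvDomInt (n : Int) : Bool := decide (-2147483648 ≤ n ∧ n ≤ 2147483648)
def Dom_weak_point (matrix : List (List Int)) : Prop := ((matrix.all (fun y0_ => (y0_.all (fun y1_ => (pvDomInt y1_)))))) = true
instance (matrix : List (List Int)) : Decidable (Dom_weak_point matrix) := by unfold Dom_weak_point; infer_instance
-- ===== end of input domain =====

-- B replaces A's build-rows / reverse-and-zip-transpose / second-loop / min-over-(sum,index)-tuples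
-- structure by one pass over the rows maintaining both row sums and a column-sum accumulator,
-- then min+index for each argmin (objective: alternative decomposition, same cost).

-- ===== PORT A =====
-- zip(*ls): the j-th elements of every list, for j below the minimum length; exact because
-- each index j taken is smaller than the length of every list (getD never hits its default).
def pyZipStar (ls : List (List Int)) : List (List Int) :=
  (List.range (((ls.map List.length).min?).getD 0)).map (fun j => ls.map (fun r => r.getD j 0))

def weak_point (matrix : List (List Int)) : List Int :=
  let rows := matrix.foldl (fun acc i => acc ++ [i.sum]) ([] : List Int)
  let row := PySem.List.min2? ((PySem.List.enumerate rows).map (fun p => (p.2, p.1)))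
              (fun q => q.1) (fun q => q.2)
  let columns := pyZipStar ((PySem.List.slice? matrix none none (-1)).getD [])
  let cols := columns.foldl (fun acc i => acc ++ [i.sum]) ([] : List Int)
  let col := PySem.List.min2? ((PySem.List.enumerate cols).map (fun p => (p.2, p.1)))
              (fun q => q.1) (fun q => q.2)
  match row, col with
  | some r, some c => [r.2, c.2]
  | _, _ => []      -- Python: min() of an empty sequence raises ValueError; excluded by Pre_

-- ===== PORT B =====
def weak_point_alt (matrix : List (List Int)) : List Int :=
  match (matrix.map List.length).min? with
  | none => []      -- Python: min() of an empty generator raises ValueError; excluded by Pre_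
  | some m =>
    -- r.getD j 0 is exact for r[j]: j < m ≤ r.length
    let rc := matrix.foldl
      (fun (p : List Int × List Int) r =>
        (p.1 ++ [r.sum], (List.range m).map (fun j => p.2.getD j 0 + r.getD j 0)))
      (([] : List Int), List.replicate m 0)
    match PySem.List.min? rc.1 (fun y => y) with
    | none => []    -- unreachable: rc.1 is nonempty whenever matrix is
    | some rv =>
      match PySem.List.min? rc.2 (fun y => y) with
      | none => []  -- Python: min([]) raises ValueError when m = 0; excluded by Pre_
      | some cv =>
        match PySem.List.index? rc.1 rv with
        | none => []  -- unreachable: rv is an element of rc.1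
        | some ri =>
          match PySem.List.index? rc.2 cv with
          | none => []  -- unreachable: cv is an element of rc.2
          | some ci => [(ri : Int), (ci : Int)]

-- ===== PRECONDITION & SPEC =====
-- Pre_ excludes exactly the inputs where A raises ValueError (and B does too):
-- the empty matrix, and matrices containing an empty row (the zipped columns are then empty).
def Pre_weak_point (matrix : List (List Int)) : Prop :=
  matrix ≠ [] ∧ ∀ r ∈ matrix, r ≠ []
instance (matrix : List (List Int)) : Decidable (Pre_weak_point matrix) := by
  unfold Pre_weak_point; infer_instance

def pvWitness_weak_point : List (List Int) := [[1, 2], [3, 4]]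

def Spec_weak_point (matrix : List (List Int)) (out : List Int) : Prop := out = weak_point_alt matrix
instance (matrix : List (List Int)) (out : List Int) : Decidable (Spec_weak_point matrix out) := by unfold Spec_weak_point; infer_instance

-- ===== CLAIM (what is proved, stated in full; the proofs are below) =====
def Claim_equal_weak_point : Prop := ∀ (matrix : List (List Int)), Dom_weak_point matrix → Pre_weak_point matrix → Spec_weak_point matrix (weak_point matrix)

-- ===== LEMMAS AND PROOFS =====

-- Python's running min over (value, index) pairs: value, best index so far, next index.
def runMin (v i k : Int) : List Int → Int × Int
  | [] => (v, i)
  | y :: ys => if y < v then runMin y k (k + 1) ys else runMin v i (k + 1) ys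

theorem foldl_append_sum (l : List (List Int)) (a : List Int) :
    l.foldl (fun acc i => acc ++ [i.sum]) a = a ++ l.map List.sum := by
  induction l generalizing a with
  | nil => simp
  | cons x xs ih => simp [List.foldl, ih]

theorem foldl_pair {α β γ : Type} (l : List α) (f : β → α → β) (g : γ → α → γ) (a : β) (c : γ) :
    l.foldl (fun p r => (f p.1 r, g p.2 r)) (a, c) = (l.foldl f a, l.foldl g c) := by
  induction l generalizing a c with
  | nil => rfl
  | cons x xs ih => simpa using ih (f a x) (g c x)

theorem colfold (l : List (List Int)) (m : Nat) (f : Nat → Int) :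
    l.foldl (fun cs r => (List.range m).map (fun j => cs.getD j 0 + r.getD j 0))
        ((List.range m).map f)
      = (List.range m).map (fun j => f j + (l.map (fun r => r.getD j 0)).sum) := by
  induction l generalizing f with
  | nil => simp
  | cons r rs ih =>
    have hstep : (List.range m).map (fun j => ((List.range m).map f).getD j 0 + r.getD j 0)
        = (List.range m).map (fun j => f j + r.getD j 0) := by
      apply List.map_congr_left
      intro j hj
      have : j < m := List.mem_range.mp hj
      simp [List.getD, this]
    simp only [List.foldl, hstep, ih]
    apply List.map_congr_left
    intro j _
    simp [add_assoc]

theorem min?_reverse (l : List Nat) : l.reverse.min? = l.min? := by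
  rcases hl : l.min? with _ | m
  · rw [List.min?_eq_none_iff] at hl; simp [hl]
  · rw [List.min?_eq_some_iff] at hl ⊢
    exact ⟨List.mem_reverse.mpr hl.1, fun b hb => hl.2 b (List.mem_reverse.mp hb)⟩

theorem min2?_cons_cons {A K1 K2 : Type} [LT K1] [DecidableLT K1] [LT K2] [DecidableLT K2]
    (p q : A) (l : List A) (k1 : A -> K1) (k2 : A -> K2) :
    PySem.List.min2? (p :: q :: l) k1 k2 =
      PySem.List.min2?
        ((if (decide (k1 q < k1 p) || !decide (k1 p < k1 q) && decide (k2 q < k2 p)) = true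
          then q else p) :: l) k1 k2 := by
  rw [PySem.List.min2?, PySem.List.min2?]
  simp only [List.foldl_cons]
  congr 1
  show (if (decide (k1 q < k1 p) || !decide (k1 p < k1 q) && decide (k2 q < k2 p)) = true
        then some q else some p)
      = some (if (decide (k1 q < k1 p) || !decide (k1 p < k1 q) && decide (k2 q < k2 p)) = true
              then q else p)
  split_ifs <;> rfl

theorem min2?_single {A K1 K2 : Type} [LT K1] [DecidableLT K1] [LT K2] [DecidableLT K2]
    (p : A) (k1 : A -> K1) (k2 : A -> K2) : PySem.List.min2? [p] k1 k2 = some p := rfl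

theorem min2_fold (t : List Int) (v i k : Int) (h : i < k) :
    PySem.List.min2? ((v, i) :: (PySem.List.enumerate t k).map (fun p => (p.2, p.1)))
      (fun q => q.1) (fun q => q.2) = some (runMin v i k t) := by
  induction t generalizing v i k with
  | nil => simp [PySem.List.enumerate_nil, runMin, min2?_single]
  | cons y ys ih =>
    have hki : ¬ (k < i) := by omega
    rw [PySem.List.enumerate_cons, List.map_cons, min2?_cons_cons]
    by_cases hy : y < v
    · simpa [runMin, hy] using ih y k (k + 1) (by omega)
    · simpa [runMin, hy, hki] using ih v i (k + 1) (by omega)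

theorem runMin_fst (t : List Int) (v i k : Int) : (runMin v i k t).1 = t.foldl min v := by
  induction t generalizing v i k with
  | nil => rfl
  | cons y ys ih =>
    by_cases hy : y < v
    · simp [runMin, if_pos hy, ih, min_eq_right (le_of_lt hy)]
    · simp [runMin, if_neg hy, ih, min_eq_left (not_lt.mp hy)]

theorem runMin_snd (t : List Int) (v i k : Int) :
    (runMin v i k t).2 =
      if t.foldl min v < v then k + ((PySem.List.index? t (t.foldl min v)).getD 0 : Int) else i := by
  induction t generalizing v i k with
  | nil => simp [runMin]
  | cons y ys ih =>
    by_cases hy : y < v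
    · have hmv : min v y = y := min_eq_right (le_of_lt hy)
      have hle : ys.foldl min y ≤ y := (PySem.List.foldl_min_le ys y).1
      rw [runMin, if_pos hy, ih, List.foldl_cons, hmv]
      by_cases h2 : ys.foldl min y < y
      · have hne : y ≠ ys.foldl min y := by omega
        have hmem : ys.foldl min y ∈ ys := (PySem.List.foldl_min_mem ys y).resolve_left (by omega)
        obtain ⟨j, hj⟩ := Option.isSome_iff_exists.mp ((PySem.List.index?_isSome_iff ys _).mpr hmem)
        rw [if_pos h2, if_pos (lt_of_le_of_lt hle hy), PySem.List.index?_cons_of_ne ys hne, hj]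
        simp; omega
      · have heq : ys.foldl min y = y := le_antisymm hle (not_lt.mp h2)
        rw [if_neg h2, heq, if_pos hy, PySem.List.index?_cons_self]
        simp
    · have hmv : min v y = v := min_eq_left (not_lt.mp hy)
      have hle : ys.foldl min v ≤ v := (PySem.List.foldl_min_le ys v).1
      rw [runMin, if_neg hy, ih, List.foldl_cons, hmv]
      by_cases h2 : ys.foldl min v < v
      · have hne : y ≠ ys.foldl min v := by omega
        have hmem : ys.foldl min v ∈ ys := (PySem.List.foldl_min_mem ys v).resolve_left (by omega)
        obtain ⟨j, hj⟩ := Option.isSome_iff_exists.mp ((PySem.List.index?_isSome_iff ys _).mpr hmem)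
        rw [if_pos h2, if_pos h2, PySem.List.index?_cons_of_ne ys hne, hj]
        simp; omega
      · rw [if_neg h2, if_neg h2]

theorem argmin_bridge (x : Int) (t : List Int) :
    ∃ (j : Nat), PySem.List.index? (x :: t) (t.foldl min x) = some j ∧
      PySem.List.min2? ((PySem.List.enumerate (x :: t)).map (fun p => (p.2, p.1)))
        (fun q => q.1) (fun q => q.2) = some (t.foldl min x, (j : Int)) := by
  have hfold : PySem.List.min2? ((PySem.List.enumerate (x :: t)).map (fun p => (p.2, p.1)))
      (fun q => q.1) (fun q => q.2) = some (runMin x 0 1 t) := by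
    rw [PySem.List.enumerate_cons, List.map_cons, zero_add]
    exact min2_fold t x 0 1 (by omega)
  have hle : t.foldl min x ≤ x := (PySem.List.foldl_min_le t x).1
  by_cases hx : t.foldl min x < x
  · have hne : x ≠ t.foldl min x := by omega
    have hmem : t.foldl min x ∈ t := (PySem.List.foldl_min_mem t x).resolve_left (by omega)
    obtain ⟨j, hj⟩ := Option.isSome_iff_exists.mp ((PySem.List.index?_isSome_iff t _).mpr hmem)
    refine ⟨j + 1, ?_, ?_⟩
    · rw [PySem.List.index?_cons_of_ne t hne, hj]; rfl
    · rw [hfold]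
      have := runMin_snd t x 0 1
      rw [if_pos hx, hj] at this
      have hfst := runMin_fst t x 0 1
      refine congrArg some (Prod.ext hfst ?_)
      rw [this]; simp; omega
  · have heq : t.foldl min x = x := le_antisymm hle (not_lt.mp hx)
    refine ⟨0, ?_, ?_⟩
    · rw [heq, PySem.List.index?_cons_self]
    · rw [hfold]
      have := runMin_snd t x 0 1
      rw [if_neg hx] at this
      exact congrArg some (Prod.ext (runMin_fst t x 0 1) (by rw [this]; rfl))

-- ===== VERDICT (by name: the statement is the Claim_ definition above) =====
theorem weak_point_spec : Claim_equal_weak_point := by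
  intro matrix _ hpre
  obtain ⟨hne, hrows⟩ := hpre
  obtain ⟨r0, rest, rfl⟩ : ∃ r0 rest, matrix = r0 :: rest := by
    cases matrix with
    | nil => exact absurd rfl hne
    | cons a b => exact ⟨a, b, rfl⟩
  obtain ⟨m, hm⟩ : ∃ m, ((r0 :: rest).map List.length).min? = some m := by
    cases h : ((r0 :: rest).map List.length).min? with
    | none => rw [List.min?_eq_none_iff] at h; simp at h
    | some m => exact ⟨m, rfl⟩
  have hm' := hm
  rw [List.min?_eq_some_iff] at hm'
  have hpos : 0 < m := by
    obtain ⟨r, hr, hrm⟩ := List.mem_map.mp hm'.1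
    have : r ≠ [] := hrows r hr
    have : 0 < r.length := List.length_pos_iff.mpr this
    omega
  obtain ⟨m', rfl⟩ : ∃ m', m = m' + 1 := ⟨m - 1, by omega⟩
  -- both sides' column sums are the per-index sums over the first (m'+1) entries of each row
  have hA_cols : (pyZipStar ((r0 :: rest).reverse)).map List.sum
      = (List.range (m' + 1)).map (fun j => ((r0 :: rest).map (fun r => r.getD j 0)).sum) := by
    simp only [pyZipStar, List.map_reverse, min?_reverse, hm, Option.getD_some, List.map_map]
    apply List.map_congr_left
    intro j _
    simp only [Function.comp]
    rw [List.sum_reverse]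
  have hB_cols : (r0 :: rest).foldl
        (fun cs r => (List.range (m' + 1)).map (fun j => cs.getD j 0 + r.getD j 0))
        (List.replicate (m' + 1) 0)
      = (List.range (m' + 1)).map (fun j => ((r0 :: rest).map (fun r => r.getD j 0)).sum) := by
    have hrep : (List.replicate (m' + 1) (0 : Int)) = (List.range (m' + 1)).map (fun _ => 0) := by
      simp
    rw [hrep, colfold]
    simp
  have hsplit : (List.foldl
        (fun (p : List Int × List Int) r =>
          (p.1 ++ [r.sum], List.map (fun j => p.2.getD j 0 + r.getD j 0) (List.range (m' + 1))))
        ([], List.replicate (m' + 1) 0) (r0 :: rest))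
      = (List.foldl (fun a r => a ++ [r.sum]) [] (r0 :: rest),
         List.foldl (fun c r => List.map (fun j => c.getD j 0 + r.getD j 0) (List.range (m' + 1)))
           (List.replicate (m' + 1) 0) (r0 :: rest)) :=
    foldl_pair (r0 :: rest) (fun (a : List Int) (r : List Int) => a ++ [r.sum])
      (fun (c : List Int) (r : List Int) =>
        List.map (fun j => c.getD j 0 + r.getD j 0) (List.range (m' + 1)))
      [] (List.replicate (m' + 1) 0)
  simp only [Spec_weak_point, weak_point, weak_point_alt, hm,
    PySem.List.slice?_none_none_neg_one, Option.getD_some, hsplit, foldl_append_sum,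
    List.nil_append, hA_cols, hB_cols]
  rw [List.range_succ_eq_map, List.map_cons (l := List.map Nat.succ (List.range m')),
    List.map_map, List.map_cons (l := rest)]
  obtain ⟨jr, hir, hmr⟩ := argmin_bridge r0.sum (rest.map List.sum)
  obtain ⟨jc, hic, hmc⟩ := argmin_bridge
    ((List.map (fun r => r.getD 0 0) (r0 :: rest)).sum)
    ((List.range m').map ((fun j => (List.map (fun r => r.getD j 0) (r0 :: rest)).sum) ∘ Nat.succ))
  rw [hmr, hmc, PySem.List.min?_id_cons, PySem.List.min?_id_cons]
  simp only [hir, hic]
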